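-- pv_equiv track=rewrite | github.com/kaleabe-n/Competitve_programming | 2477-minimum-fuel-cost-to-report-to-the-capital/2477-minimum-fuel-cost-to-report-to-the-capital.py | dfs
-- ===== SOURCE A (Python) =====
-- def dfs(parent,child,graph,seats):
--     if len(graph[child]) == 1 and graph[child][0] == parent:
--         return 1,1
--     if len(graph[child])== 0:
--         return 0,0
--     fuelTotal = 0
--     totalPeople = 0
--     for node in graph[child]:
--         if node != parent:
--             fuel,people=dfs(child,node,graph,seats)
--             fuelTotal += fuel
--             totalPeople += people
--     if child == 0:
--         return fuelTotal,totalPeople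
--     totalPeople+=1
--     if totalPeople % seats == 0:
--         fuelTotal += totalPeople // seats
--     else:
--         fuelTotal += totalPeople // seats + 1
--     return fuelTotal,totalPeople
-- ===== SOURCE B (Python) =====
-- def dfs(parent, child, graph, seats):
--     # Two independent recursions instead of one pair-valued recursion:
--     # `people` counts the riders of a subtree, `fuel` sums per-node fuel,
--     # with the ceiling taken in closed form as -(-p // seats).
--     def people(par, node):
--         a = graph[node]
--         if len(a) == 1 and a[0] == par:
--             return 1
--         if len(a) == 0:
--             return 0
--         s = sum(people(node, m) for m in a if m != par)
--         return s if node == 0 else s + 1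
--
--     def fuel(par, node):
--         a = graph[node]
--         if len(a) == 1 and a[0] == par:
--             return 1
--         if len(a) == 0:
--             return 0
--         s = sum(fuel(node, m) for m in a if m != par)
--         if node == 0:
--             return s
--         return s + -(-people(par, node) // seats)
--
--     return fuel(parent, child), people(parent, child)
-- ===== Notes on version B (the rewrite author's own statement) =====
-- stated objective: alternative
-- what changed: Replaces A's single pair-valued recursion with an accumulating loop by two independent recursions (subtree people-count and fuel) over filtered map-sums, with the ceiling computed in closed form as -(-people // seats) instead of a remainder test; Pre_ excludes the inputs where A raises (KeyError on a reached missing row, unbounded recursion on a cyclic call-pair relation, ZeroDivisionError) by requiring, beyond A's immediate-return rows, a terminating call-pair graph and seats != 0 outright, the latter also leaving out seats=0 runs that happen to reach no division, where B agrees with A.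
-- outside the precondition, e.g. on dfs(-1, 0, {0: [1], 1: [0]}, 0): A returns (1, 1), B returns (1, 1)
import Mathlib
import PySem

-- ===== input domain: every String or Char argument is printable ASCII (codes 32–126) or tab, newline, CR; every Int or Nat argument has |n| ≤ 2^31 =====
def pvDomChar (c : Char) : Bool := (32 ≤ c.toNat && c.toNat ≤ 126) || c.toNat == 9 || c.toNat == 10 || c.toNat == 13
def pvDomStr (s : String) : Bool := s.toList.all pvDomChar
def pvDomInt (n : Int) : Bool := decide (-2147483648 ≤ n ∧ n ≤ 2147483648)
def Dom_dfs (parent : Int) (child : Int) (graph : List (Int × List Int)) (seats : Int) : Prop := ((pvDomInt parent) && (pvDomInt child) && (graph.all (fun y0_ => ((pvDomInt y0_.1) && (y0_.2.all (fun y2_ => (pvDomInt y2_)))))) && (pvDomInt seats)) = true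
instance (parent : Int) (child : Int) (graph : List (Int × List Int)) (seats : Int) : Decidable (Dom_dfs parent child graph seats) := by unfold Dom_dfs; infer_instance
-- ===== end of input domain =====

-- B replaces A's single pair-valued recursion by two independent recursions (people count and
-- fuel) with the ceiling taken in closed form; objective: alternative decomposition, not speed.

-- ===== PORT A =====
-- A's recursion made total with a fuel counter; within Pre_dfs (an acyclic call-pair graph,
-- or an immediately-returning row) the Python recursion never goes deeper than the number of
-- distinct (caller, node) pairs, so the fuel below is never exhausted.
-- graph[child] is the dict lookup (first match); A raises KeyError where the row is missing,
-- which Pre_dfs excludes, so the [] default of getD is never reached inside Pre_dfs.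
def dfsFuel (graph : List (Int × List Int)) (seats : Int) : Nat → Int → Int → Int × Int
  | 0, _, _ => (0, 0)
  | n+1, parent, child =>
    let adj := (PySem.Dict.mk graph).getD child []
    if adj.length = 1 ∧ PySem.List.pyGetD adj 0 0 = parent then (1, 1)
    else if adj.length = 0 then (0, 0)
    else
      let acc := adj.foldl (fun (acc : Int × Int) node =>
        if node ≠ parent then
          let r := dfsFuel graph seats n child node
          (acc.1 + r.1, acc.2 + r.2)
        else acc) (0, 0)
      if child = 0 then acc
      else
        let totalPeople := acc.2 + 1
        if PySem.Int.mod totalPeople seats = 0 then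
          (acc.1 + PySem.Int.floordiv totalPeople seats, totalPeople)
        else
          (acc.1 + PySem.Int.floordiv totalPeople seats + 1, totalPeople)

-- fuel bound: on Pre_dfs's acyclic call-pair graphs the recursion depth is at most the number
-- of distinct (caller, node) pairs, itself below (#rows + #listed neighbours + 2)^2.
def dfs (parent : Int) (child : Int) (graph : List (Int × List Int)) (seats : Int) : Int × Int :=
  dfsFuel graph seats ((graph.length + (graph.map (fun p => p.2.length)).sum + 2) ^ 2 + 3) parent child

-- ===== PORT B =====
-- Source B's `people`: the rider count of the subtree, on its own (same fuel discipline as port A).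
def peopleFuel (graph : List (Int × List Int)) : Nat → Int → Int → Int
  | 0, _, _ => 0
  | n+1, par, node =>
    let a := (PySem.Dict.mk graph).getD node []
    if a.length = 1 ∧ PySem.List.pyGetD a 0 0 = par then 1
    else if a.length = 0 then 0
    else
      let s := ((a.filter (fun m => m ≠ par)).map (peopleFuel graph n node)).sum
      if node = 0 then s else s + 1

-- Source B's `fuel`: sums children's fuel and adds the closed-form ceiling -(-people // seats).
def fuelFuel (graph : List (Int × List Int)) (seats : Int) : Nat → Int → Int → Int
  | 0, _, _ => 0
  | n+1, par, node =>
    let a := (PySem.Dict.mk graph).getD node []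
    if a.length = 1 ∧ PySem.List.pyGetD a 0 0 = par then 1
    else if a.length = 0 then 0
    else
      let s := ((a.filter (fun m => m ≠ par)).map (fuelFuel graph seats n node)).sum
      if node = 0 then s
      else s + -PySem.Int.floordiv (-(peopleFuel graph (n+1) par node)) seats

def dfs_alt (parent : Int) (child : Int) (graph : List (Int × List Int)) (seats : Int) : Int × Int :=
  (fuelFuel graph seats ((graph.length + (graph.map (fun p => p.2.length)).sum + 2) ^ 2 + 3) parent child,
   peopleFuel graph ((graph.length + (graph.map (fun p => p.2.length)).sum + 2) ^ 2 + 3) parent child)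

-- ===== PRECONDITION & SPEC =====
-- A's recursion state is the pair (caller, node); from (p, n) it recurses to (n, m) for every
-- m ≠ p in n's row.  pvTerm is the exact domain of that recursion: every reachable pair's node
-- has a row (else KeyError) and no pair can reach itself again (else unbounded recursion).
def pvNext (g : List (Int × List Int)) (pr : Int × Int) : List (Int × Int) :=
  (((PySem.Dict.mk g).getD pr.2 []).filter (fun m => m ≠ pr.1)).map (fun m => (pr.2, m))

def pvGrow (g : List (Int × List Int)) (S : List (Int × Int)) : List (Int × Int) :=
  (S ++ S.flatMap (pvNext g)).dedup

-- saturate pvGrow to its fixpoint; the distinct reachable pairs are at most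
-- (#rows + #listed neighbours + 2)^2, so that many rounds always suffice.
def pvIter (g : List (Int × List Int)) : Nat → List (Int × Int) → List (Int × Int)
  | 0, S => S
  | k+1, S => let S' := pvGrow g S; if S' = S then S else pvIter g k S'

def pvReach (g : List (Int × List Int)) (S : List (Int × Int)) : List (Int × Int) :=
  pvIter g ((g.length + (g.map (fun p => p.2.length)).sum + 2) ^ 2 + 1) S

def pvTerm (parent child : Int) (g : List (Int × List Int)) : Bool :=
  (pvReach g [(parent, child)]).all (fun pr =>
    (g.map Prod.fst).contains pr.2 && !(pvReach g (pvNext g pr)).contains pr)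

-- Pre_dfs excludes exactly the inputs on which A raises — KeyError on a missing row of a node
-- the recursion reaches, RecursionError where the call-pair relation has a reachable cycle,
-- ZeroDivisionError for seats = 0 — except that, beyond the rows on which A returns
-- immediately ([] or [parent]), it asks for seats ≠ 0 outright: this also leaves out seats = 0
-- inputs whose run happens to reach no division and A still returns; B returns the same value
-- there — see the excluded example in the claim.
def Pre_dfs (parent : Int) (child : Int) (graph : List (Int × List Int)) (seats : Int) : Prop :=
  child ∈ graph.map Prod.fst ∧
  ((PySem.Dict.mk graph).getD child [] = [] ∨
   (PySem.Dict.mk graph).getD child [] = [parent] ∨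
   (seats ≠ 0 ∧ pvTerm parent child graph = true))
instance (parent : Int) (child : Int) (graph : List (Int × List Int)) (seats : Int) : Decidable (Pre_dfs parent child graph seats) := by unfold Pre_dfs; infer_instance

def pvWitness_dfs : Int × Int × (List (Int × List Int)) × Int := (-1, 0, [(0, [1]), (1, [0])], 2)

def Spec_dfs (parent : Int) (child : Int) (graph : List (Int × List Int)) (seats : Int) (out : Int × Int) : Prop := out = dfs_alt parent child graph seats
instance (parent : Int) (child : Int) (graph : List (Int × List Int)) (seats : Int) (out : Int × Int) : Decidable (Spec_dfs parent child graph seats out) := by unfold Spec_dfs; infer_instance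

-- ===== CLAIM (what is proved, stated in full; the proofs are below) =====
def Claim_equal_dfs : Prop := ∀ (parent : Int) (child : Int) (graph : List (Int × List Int)) (seats : Int), Dom_dfs parent child graph seats → Pre_dfs parent child graph seats → Spec_dfs parent child graph seats (dfs parent child graph seats)

-- ===== LEMMAS AND PROOFS =====

-- Python's `p // s + (0 or 1)` remainder test is the ceiling -(-p // s), for any s ≠ 0.
lemma ceil_div_eq (a b : Int) (hb : b ≠ 0) :
    (if PySem.Int.mod a b = 0 then PySem.Int.floordiv a b else PySem.Int.floordiv a b + 1)
      = -PySem.Int.floordiv (-a) b := by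
  have h1 := PySem.Int.floordiv_mul_add_mod a b
  have h2 := PySem.Int.floordiv_mul_add_mod (-a) b
  have hkb : (PySem.Int.floordiv a b + PySem.Int.floordiv (-a) b) * b
      = -(PySem.Int.mod a b + PySem.Int.mod (-a) b) := by linear_combination h1 + h2
  set q := PySem.Int.floordiv a b
  set r := PySem.Int.mod a b
  set q' := PySem.Int.floordiv (-a) b
  set r' := PySem.Int.mod (-a) b
  rcases lt_or_gt_of_ne hb with hneg | hpos
  · have hb1 := PySem.Int.mod_neg_bounds (a := a) hneg
    have hb2 := PySem.Int.mod_neg_bounds (a := -a) hneg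
    split_ifs with h
    · nlinarith [hb1.1, hb1.2, hb2.1, hb2.2, sq_nonneg (q + q')]
    · have hklt : q + q' < 0 := by
        by_contra hc
        have : (q + q') * b ≤ 0 :=
          mul_nonpos_of_nonneg_of_nonpos (by omega) hneg.le
        omega
      have hkgt : -2 < q + q' := by
        by_contra hc
        have : (-2) * b ≤ (q + q') * b :=
          mul_le_mul_of_nonpos_right (by omega) hneg.le
        omega
      omega
  · have hb1lo := PySem.Int.mod_nonneg (a := a) hpos
    have hb1hi := PySem.Int.mod_lt (a := a) hpos
    have hb2lo := PySem.Int.mod_nonneg (a := -a) hpos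
    have hb2hi := PySem.Int.mod_lt (a := -a) hpos
    split_ifs with h
    · nlinarith [sq_nonneg (q + q')]
    · have hklt : q + q' < 0 := by
        by_contra hc
        have : 0 ≤ (q + q') * b := mul_nonneg (by omega) hpos.le
        omega
      have hkgt : -2 < q + q' := by
        by_contra hc
        have : (q + q') * b ≤ (-2) * b :=
          mul_le_mul_of_nonneg_right (by omega) hpos.le
        omega
      omega

-- A's one pass accumulating a pair equals B's two filtered map-sums, componentwise, as soon
-- as the per-element recursive values agree pairwise on the list's members.
lemma foldl_pair_split_mem (p : Int) (D : Int → Int × Int) (F G : Int → Int) :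
    ∀ (l : List Int), (∀ v ∈ l, v ≠ p → D v = (F v, G v)) → ∀ (a b : Int),
      l.foldl (fun (acc : Int × Int) node =>
          if node = p then acc else (acc.1 + (D node).1, acc.2 + (D node).2)) (a, b)
        = (a + ((l.filter (fun m => !decide (m = p))).map F).sum,
           b + ((l.filter (fun m => !decide (m = p))).map G).sum) := by
  intro l
  induction l with
  | nil => intro _ a b; simp
  | cons x xs ihl =>
    intro hl a b
    have hxs : ∀ v ∈ xs, v ≠ p → D v = (F v, G v) := fun v hv => hl v (List.mem_cons_of_mem x hv)
    by_cases hx : x = p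
    · simp [List.foldl_cons, hx, ihl hxs]
    · have hD := hl x List.mem_cons_self hx
      simp [List.foldl_cons, hx, hD]
      rw [ihl hxs]
      simp [add_assoc]

-- The heart of the claim: at EVERY fuel level the two ports agree (seats ≠ 0).
lemma dfsFuel_eq (graph : List (Int × List Int)) (seats : Int) (hs : seats ≠ 0) :
    ∀ (n : Nat) (parent child : Int),
      dfsFuel graph seats n parent child
        = (fuelFuel graph seats n parent child, peopleFuel graph n parent child) := by
  intro n
  induction n with
  | zero => intro _ _; rfl
  | succ n ih =>
    intro parent child
    have hfold := foldl_pair_split_mem parent (dfsFuel graph seats n child)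
      (fuelFuel graph seats n child) (peopleFuel graph n child)
      ((PySem.Dict.mk graph).getD child []) (fun v _ _ => ih child v)
    by_cases h1 : ((PySem.Dict.mk graph).getD child []).length = 1 ∧
        PySem.List.pyGetD ((PySem.Dict.mk graph).getD child []) 0 0 = parent
    · simp [dfsFuel, fuelFuel, peopleFuel, h1]
    · by_cases h2 : ((PySem.Dict.mk graph).getD child []).length = 0
      · simp [dfsFuel, fuelFuel, peopleFuel, h2]
      · by_cases h0 : child = 0
        · subst h0
          simp [dfsFuel, fuelFuel, peopleFuel, h1, h2, hfold]
        · simp [dfsFuel, fuelFuel, peopleFuel, h1, h2, h0, hfold]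
          set sP := ((((PySem.Dict.mk graph).getD child []).filter
            (fun m => !decide (m = parent))).map (peopleFuel graph n child)).sum with hsP
          rw [show (-1 + -sP : Int) = -(sP + 1) by ring, ← ceil_div_eq (sP + 1) seats hs]
          split_ifs with hm <;> simp [add_assoc]

-- ===== VERDICT (by name: the statement is the Claim_ definition above) =====
theorem dfs_spec : Claim_equal_dfs := by
  intro parent child graph seats _ hpre
  show dfs parent child graph seats = dfs_alt parent child graph seats
  obtain ⟨_, hcase⟩ := hpre
  rcases hcase with hemp | hleaf | ⟨hs, _⟩
  · simp [dfs, dfs_alt, dfsFuel, fuelFuel, peopleFuel, hemp]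
  · simp [dfs, dfs_alt, dfsFuel, fuelFuel, peopleFuel, hleaf, PySem.List.pyGetD]
  · exact dfsFuel_eq graph seats hs _ parent child
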